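-- pv_equiv track=rewrite | github.com/sp92231/CIS4930 | WordRank2/portal.py | transform_word
-- ===== SOURCE A (Python) =====
-- def transform_word(token: str) -> str:
--     """
--     This function transforms the incoming word to prepare it for storage. There are four
--     transformations applied:
--       1. Leading/trailing whitespace is removed
--       2. The word is converted to all lowercase letters
--       3. All instances of an apostrophe followed by an s at the end of the word are
--          removed. This is done to eliminate possessive forms of words.
--       4. All remaining punctuation is removed from anywhere in the word. See
--          https://www.geeksforgeeks.org/python-remove-punctuation-from-string/ or
--          https://stackoverflow.com/questions/265960/best-way-to-strip-punctuation-from-a-string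
--
--     Args:
--       token: The incoming raw token to be transformed into a "word"
--
--     Returns:
--       The transformed token, now suitable for storage
--     """
--     # String initialized with all possible punctuation.
--     puncList = r'''!()-[]{};:'"“”\,<>./?@#$%^&*_~'''
--
--     # Removing whitespaces and transforming to lowercase.
--     token = token.strip()
--     token = token.lower()
--
--     # Remove all punctuation.
--     for ele in token:
--         if ele in puncList:
--             token = token.replace(ele, "")
--
--     # Return token.
--     return token
-- ===== SOURCE B (Python) =====
-- def transform_word(token: str) -> str:
--     """Strip, lowercase, then delete all punctuation in one translate pass."""
--     puncList = r'''!()-[]{};:'"“”\,<>./?@#$%^&*_~'''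
--     table = str.maketrans('', '', puncList)
--     return token.strip().lower().translate(table)
-- ===== Notes on version B (the rewrite author's own statement) =====
-- stated objective: idiomatic
-- what changed: Replaces A's loop that calls str.replace once per punctuation character found (re-scanning the whole string each time) with a single translate pass over a deletion table built once.
import Mathlib
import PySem

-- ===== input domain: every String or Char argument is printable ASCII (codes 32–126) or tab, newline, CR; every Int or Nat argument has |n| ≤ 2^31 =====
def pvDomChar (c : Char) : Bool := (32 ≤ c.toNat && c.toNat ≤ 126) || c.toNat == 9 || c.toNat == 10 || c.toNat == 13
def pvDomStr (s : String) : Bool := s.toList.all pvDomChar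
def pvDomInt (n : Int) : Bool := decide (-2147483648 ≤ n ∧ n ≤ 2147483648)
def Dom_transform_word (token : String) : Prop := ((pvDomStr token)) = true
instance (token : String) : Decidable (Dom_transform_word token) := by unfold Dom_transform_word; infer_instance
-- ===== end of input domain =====

-- B replaces A's per-punctuation-character full-string str.replace loop with one table-driven
-- deletion pass (str.maketrans/translate); same output, one scan instead of repeated scans.

-- the punctuation set both programs share (same raw string literal)
def pvPunc : List Char := "!()-[]{};:'\"“”\\,<>./?@#$%^&*_~".toList

-- ===== PORT A =====
def transform_word (token : String) : String :=
  -- token = token.strip(); token = token.lower()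
  let t := PySem.Chars.lower (PySem.Chars.strip token.toList)
  -- for ele in token: if ele in puncList: token = token.replace(ele, "")
  -- (the loop iterates over the string object bound at loop entry)
  String.ofList (t.foldl
    (fun tok ele => if PySem.Chars.isIn [ele] pvPunc then PySem.Chars.replace tok [ele] [] else tok) t)

-- ===== PORT B =====
def transform_word_alt (token : String) : String :=
  -- token.strip().lower().translate(str.maketrans('', '', puncList)):
  -- a pure deletion table; translate deletes exactly the characters of pvPunc in one pass
  String.ofList ((PySem.Chars.lower (PySem.Chars.strip token.toList)).filter
    (fun c => !(pvPunc.contains c)))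

-- ===== PRECONDITION & SPEC =====
def Spec_transform_word (token : String) (out : String) : Prop := out = transform_word_alt token
instance (token : String) (out : String) : Decidable (Spec_transform_word token out) := by unfold Spec_transform_word; infer_instance

-- ===== CLAIM (what is proved, stated in full; the proofs are below) =====
def Claim_equal_transform_word : Prop := ∀ (token : String), Dom_transform_word token → Spec_transform_word token (transform_word token)

-- ===== LEMMAS AND PROOFS =====

-- s.replace(c, "") for a single character c deletes every occurrence of c
theorem replace_go_single_del (c : Char) : ∀ (fuel : Nat) (l acc : List Char),
    l.length ≤ fuel →
    PySem.Chars.replace.go [c] [] fuel l acc = acc.reverse ++ l.filter (· ≠ c) := by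
  intro fuel
  induction fuel with
  | zero =>
    intro l acc h
    have : l = [] := List.eq_nil_of_length_eq_zero (Nat.le_zero.mp h)
    subst this; simp [PySem.Chars.replace.go]
  | succ n ih =>
    intro l acc h
    cases l with
    | nil => simp [PySem.Chars.replace.go]
    | cons x t =>
      simp only [PySem.Chars.replace.go]
      by_cases hx : x = c
      · subst hx
        have hpre : [x].isPrefixOf (x :: t) = true := by simp [List.isPrefixOf]
        rw [if_pos hpre]
        simp only [List.length_cons] at h
        rw [ih _ _ (by simp; omega)]
        simp
      · have hpre : [c].isPrefixOf (x :: t) = false := by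
          simp [List.isPrefixOf]; exact fun hh => hx hh.symm
        rw [if_neg (by simp [hpre])]
        simp only [List.length_cons] at h
        rw [ih _ _ (by omega)]
        simp [hx]

theorem replace_single_del (s : List Char) (c : Char) :
    PySem.Chars.replace s [c] [] = s.filter (· ≠ c) := by
  rw [PySem.Chars.replace]
  simp only [List.isEmpty_cons, if_false, Bool.false_eq_true]
  exact (replace_go_single_del c s.length s [] le_rfl).trans (by simp)

-- 'c in puncList' for a single character is membership
theorem isIn_single (c : Char) (P : List Char) : PySem.Chars.isIn [c] P = P.contains c := by
  rw [Bool.eq_iff_iff, PySem.Chars.isIn_iff_infix, List.contains_eq_mem, decide_eq_true_iff]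
  exact List.singleton_infix_iff c P

-- A's loop: each punctuation character found triggers a full deletion; the net effect on the
-- accumulator is filtering out every character that is punctuation and occurs in the iterated list
theorem foldl_del_eq_filter (P : List Char) : ∀ (l acc : List Char),
    l.foldl (fun tok ele => if P.contains ele then tok.filter (· ≠ ele) else tok) acc
      = acc.filter (fun x => !(P.contains x && l.contains x)) := by
  intro l
  induction l with
  | nil => intro acc; simp
  | cons e rest ih =>
    intro acc
    simp only [List.foldl_cons]
    by_cases he : P.contains e = true
    · rw [if_pos he, ih, List.filter_filter]
      apply List.filter_congr
      intro x _
      by_cases hx : x = e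
      · subst hx
        have : x ∈ P := by simpa [List.contains_eq_mem] using he
        simp [this]
      · simp [hx]
    · rw [if_neg he, ih]
      apply List.filter_congr
      intro x _
      by_cases hx : x = e
      · subst hx
        have : x ∉ P := by simpa [List.contains_eq_mem] using he
        simp [this]
      · simp [hx]

-- ===== VERDICT (by name: the statement is the Claim_ definition above) =====
theorem transform_word_spec : Claim_equal_transform_word := by
  intro token _
  unfold Spec_transform_word transform_word transform_word_alt
  simp only [isIn_single, replace_single_del]
  rw [foldl_del_eq_filter]
  congr 1
  apply List.filter_congr
  intro x hx
  simp [List.contains_eq_mem, hx]
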